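-- pv_equiv track=rewrite | github.com/GizawAAiT/Codeforces | B_Borze.py | solve
-- ===== SOURCE A (Python) =====
-- def solve(bronze):
--     st = []
--     res = ''
--     for chr in bronze:
--         if chr == '.':
--             if st:
--                 res += '1'
--                 st.pop()
--             else:
--                 res += '0'
--
--         else:
--
--             if st:
--                 res += '2'
--                 st.pop()
--             else:
--                 st.append('_')
--
--     return res
-- ===== SOURCE B (Python) =====
-- def solve(bronze):
--     res = []
--     i = 0
--     n = len(bronze)
--     while i < n:
--         if bronze[i] == '.':
--             res.append('0')
--             i += 1
--         elif i + 1 < n: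
--             res.append('1' if bronze[i + 1] == '.' else '2')
--             i += 2
--         else:
--             break
--     return ''.join(res)
-- ===== Notes on version B (the rewrite author's own statement) =====
-- stated objective: alternative
-- what changed: Replaced the stack/flag automaton that processes one char at a time with an index-driven look-ahead decoder that consumes a dash together with its following char in one step, building the output via list-append and a final join.
import Mathlib
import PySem

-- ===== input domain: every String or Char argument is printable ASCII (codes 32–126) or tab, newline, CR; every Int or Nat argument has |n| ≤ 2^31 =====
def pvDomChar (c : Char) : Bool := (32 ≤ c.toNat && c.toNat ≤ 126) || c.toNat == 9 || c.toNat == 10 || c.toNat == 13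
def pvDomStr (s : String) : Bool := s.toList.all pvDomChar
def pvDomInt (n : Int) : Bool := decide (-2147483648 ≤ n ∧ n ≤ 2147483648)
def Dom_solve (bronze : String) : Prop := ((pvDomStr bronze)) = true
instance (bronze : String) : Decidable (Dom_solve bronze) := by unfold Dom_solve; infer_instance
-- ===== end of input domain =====

-- B replaces A's stack/flag automaton with an index-driven look-ahead decoder
-- consuming a dash together with its following character in one step (alternative decomposition, same cost).


-- ===== PORT A =====
-- A's loop: state is the stack `st` (only ever [] or ['_']) and the accumulated string `res`.
def solveLoop : List Char → List Char → String → String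
  | [], _, res => res
  | c :: rest, st, res =>
    if c = '.' then
      match st with
      | _ :: stTail => solveLoop rest stTail (res ++ "1")
      | [] => solveLoop rest [] (res ++ "0")
    else
      match st with
      | _ :: stTail => solveLoop rest stTail (res ++ "2")
      | [] => solveLoop rest ['_'] res

def solve (bronze : String) : String := solveLoop bronze.toList [] ""

-- ===== PORT B =====
-- B's while-loop over an index with one-char look-ahead, consuming two chars per dash.
def solveAltLoop (cs : List Char) (i : Nat) (res : String) : String :=
  if h : i < cs.length then
    if cs[i] = '.' then
      solveAltLoop cs (i + 1) (res ++ "0")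
    else if h2 : i + 1 < cs.length then
      if cs[i + 1] = '.' then solveAltLoop cs (i + 2) (res ++ "1")
      else solveAltLoop cs (i + 2) (res ++ "2")
    else res
  else res
termination_by cs.length - i

def solve_alt (bronze : String) : String := solveAltLoop bronze.toList 0 ""

-- ===== PRECONDITION & SPEC =====
def Spec_solve (bronze : String) (out : String) : Prop := out = solve_alt bronze
instance (bronze : String) (out : String) : Decidable (Spec_solve bronze out) := by unfold Spec_solve; infer_instance

-- ===== CLAIM (what is proved, stated in full; the proofs are below) =====
def Claim_equal_solve : Prop := ∀ (bronze : String), Dom_solve bronze → Spec_solve bronze (solve bronze)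

-- ===== LEMMAS AND PROOFS =====

-- canonical decode of a suffix (proof-only helper)
def dec : List Char → String
  | [] => ""
  | [c] => if c = '.' then "0" else ""
  | c :: d :: t =>
    if c = '.' then "0" ++ dec (d :: t)
    else (if d = '.' then "1" else "2") ++ dec t

-- decode of a suffix when the automaton has a pending dash
def dec2 : List Char → String
  | [] => ""
  | d :: t => (if d = '.' then "1" else "2") ++ dec t

theorem dec_dot (t : List Char) : dec ('.' :: t) = "0" ++ dec t := by
  cases t <;> simp [dec]

theorem dec_dash {c : Char} (hc : ¬ c = '.') (t : List Char) :
    dec (c :: t) = dec2 t := by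
  cases t <;> simp [dec, dec2, hc]

theorem solveLoop_eq (l : List Char) :
    (∀ res, solveLoop l [] res = res ++ dec l) ∧
    (∀ res, solveLoop l ['_'] res = res ++ dec2 l) := by
  induction l with
  | nil => simp [solveLoop, dec, dec2]
  | cons c t ih =>
    constructor
    · intro res
      by_cases hc : c = '.'
      · subst hc
        rw [dec_dot]
        simp [solveLoop, ih.1, String.append_assoc]
      · rw [dec_dash hc]
        simp [solveLoop, hc, ih.2]
    · intro res
      by_cases hc : c = '.' <;>
        simp [solveLoop, hc, dec2, ih.1, String.append_assoc]

theorem solveAltLoop_eq (cs : List Char) (i : Nat) (res : String) :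
    solveAltLoop cs i res = res ++ dec (cs.drop i) := by
  by_cases h : i < cs.length
  · have hdrop : cs.drop i = cs[i] :: cs.drop (i + 1) := List.drop_eq_getElem_cons h
    rw [solveAltLoop]
    by_cases hc : cs[i] = '.'
    · rw [solveAltLoop_eq cs (i + 1) (res ++ "0"), hdrop, hc, dec_dot]
      simp [h, hc, String.append_assoc]
    · by_cases h2 : i + 1 < cs.length
      · have hdrop2 : cs.drop (i + 1) = cs[i + 1] :: cs.drop (i + 2) :=
          List.drop_eq_getElem_cons h2
        rw [hdrop, dec_dash hc, hdrop2, dec2]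
        by_cases hd : cs[i + 1] = '.' <;>
          simp [h, hc, h2, hd, String.append_assoc, solveAltLoop_eq cs (i + 2)]
      · have hdrop2 : cs.drop (i + 1) = [] := by
          apply List.drop_eq_nil_of_le; omega
        rw [hdrop, dec_dash hc, hdrop2, dec2]
        simp [h, hc, h2]
  · have hnil : cs.drop i = [] := by apply List.drop_eq_nil_of_le; omega
    rw [solveAltLoop, hnil]
    simp [h, dec]
termination_by cs.length - i

-- ===== VERDICT (by name: the statement is the Claim_ definition above) =====
theorem solve_spec : Claim_equal_solve := by
  intro bronze _
  unfold Spec_solve solve solve_alt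
  rw [(solveLoop_eq bronze.toList).1, solveAltLoop_eq]
  simp
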